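-- pv_equiv track=rewrite | github.com/ChristinaJSYu/stanCode_Python_Project | Python_Project/Boggle Game Solver/boggle.py | legal_check
-- ===== SOURCE A (Python) =====
-- def legal_check(letter):
-- 	"""
-- 	This function will check if letter is legal.
-- 	"""
-- 	tmp = 0
-- 	for ele in letter:
-- 		if tmp % 2 == 0:
-- 			if not ele.isalpha():
-- 				return False
-- 		else:
-- 			if not ele.isspace():
-- 				return False
-- 		tmp += 1
-- 	return True
-- ===== SOURCE B (Python) =====
-- def legal_check(letter):
-- 	"""
-- 	Recursive pair-consuming check: first char must be alphabetic, the
-- 	following char (if any) must be whitespace, then recurse on the rest.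
-- 	"""
-- 	if letter == "":
-- 		return True
-- 	if not letter[0].isalpha():
-- 		return False
-- 	if len(letter) == 1:
-- 		return True
-- 	if not letter[1].isspace():
-- 		return False
-- 	return legal_check(letter[2:])
-- ===== Notes on version B (the rewrite author's own statement) =====
-- stated objective: alternative
-- what changed: Replaced the indexed loop with a parity counter by a recursion that consumes the string two characters at a time (letter then separator), eliminating the counter entirely.
import Mathlib
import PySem

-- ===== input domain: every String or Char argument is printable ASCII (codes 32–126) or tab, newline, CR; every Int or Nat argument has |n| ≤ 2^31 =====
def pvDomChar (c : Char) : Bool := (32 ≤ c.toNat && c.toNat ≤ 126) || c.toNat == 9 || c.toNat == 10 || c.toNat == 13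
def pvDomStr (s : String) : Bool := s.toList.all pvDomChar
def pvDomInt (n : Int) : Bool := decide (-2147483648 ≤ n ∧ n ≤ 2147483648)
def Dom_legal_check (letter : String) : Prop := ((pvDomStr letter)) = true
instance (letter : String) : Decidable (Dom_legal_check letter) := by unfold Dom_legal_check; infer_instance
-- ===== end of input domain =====

-- B replaces A's parity-counter loop with a recursion consuming two characters at a time (alternative decomposition, same cost).

-- ===== PORT A =====
-- the 'for ele in letter' loop with counter tmp and early returns
def legalCheckLoop : List Char → Nat → Bool
  | [], _ => true
  | ele :: rest, tmp =>
    if tmp % 2 == 0 then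
      if !(PySem.Chars.isalpha ele) then false else legalCheckLoop rest (tmp + 1)
    else
      if !(PySem.Chars.isspace ele) then false else legalCheckLoop rest (tmp + 1)

def legal_check (letter : String) : Bool := legalCheckLoop letter.toList 0

-- ===== PORT B =====
-- Source B's recursion: empty → True; letter[0] must be alpha; single char → True;
-- letter[1] must be space; recurse on letter[2:]
def legalCheckRec : List Char → Bool
  | [] => true
  | c :: rest =>
    if !(PySem.Chars.isalpha c) then false
    else match rest with
      | [] => true
      | d :: rest' => if !(PySem.Chars.isspace d) then false else legalCheckRec rest'

def legal_check_alt (letter : String) : Bool := legalCheckRec letter.toList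

-- ===== PRECONDITION & SPEC =====
def Spec_legal_check (letter : String) (out : Bool) : Prop := out = legal_check_alt letter
instance (letter : String) (out : Bool) : Decidable (Spec_legal_check letter out) := by unfold Spec_legal_check; infer_instance

-- ===== CLAIM (what is proved, stated in full; the proofs are below) =====
def Claim_equal_legal_check : Prop := ∀ (letter : String), Dom_legal_check letter → Spec_legal_check letter (legal_check letter)

-- ===== LEMMAS AND PROOFS =====
theorem legalCheckLoop_even : ∀ (l : List Char) (tmp : Nat), tmp % 2 = 0 → legalCheckLoop l tmp = legalCheckRec l
  | [], _, _ => rfl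
  | [c], tmp, h => by
      simp only [legalCheckLoop, legalCheckRec, h]
      cases hc : PySem.Chars.isalpha c <;> simp
  | c :: d :: rest, tmp, h => by
      have ih := legalCheckLoop_even rest (tmp + 1 + 1) (by omega)
      have hodd : (tmp + 1) % 2 = 1 := by omega
      simp only [legalCheckLoop, legalCheckRec, h, hodd]
      cases hc : PySem.Chars.isalpha c <;> simp
      cases hd : PySem.Chars.isspace d <;> simp [ih]

-- ===== VERDICT (by name: the statement is the Claim_ definition above) =====
theorem legal_check_spec : Claim_equal_legal_check := by
  intro letter _
  unfold Spec_legal_check legal_check legal_check_alt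
  exact legalCheckLoop_even letter.toList 0 rfl
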